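-- pv_equiv track=rewrite | github.com/anishdeshmukh9/AI_edu_bot | server/F7/_F7_audio_generator.py | parse_podcast_script
-- ===== SOURCE A (Python) =====
-- from typing import Tuple, Optional
--
-- def parse_podcast_script(script: str) -> list[Tuple[str, str]]:
--     """
--     Parse podcast script into list of (speaker, text) tuples
--
--     Args:
--         script: Raw script text with "Alex:" and "Sam:" labels
--
--     Returns:
--         List of (speaker, dialogue) tuples
--     """
--     lines = []
--     current_speaker = None
--     current_text = []
--
--     for line in script.split('\n'):
--         line = line.strip()
--         if not line:
--             continue
--
--         # Check if line starts with speaker label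
--         if line.startswith('Alex:'):
--             # Save previous speaker's text if exists
--             if current_speaker and current_text:
--                 lines.append((current_speaker, ' '.join(current_text)))
--             current_speaker = 'Alex'
--             current_text = [line[5:].strip()]  # Remove "Alex:" prefix
--
--         elif line.startswith('Sam:'):
--             # Save previous speaker's text if exists
--             if current_speaker and current_text:
--                 lines.append((current_speaker, ' '.join(current_text)))
--             current_speaker = 'Sam'
--             current_text = [line[4:].strip()]  # Remove "Sam:" prefix
--
--         else:
--             # Continuation of current speaker's text
--             if current_speaker:
--                 current_text.append(line)
--
--     # Add final speaker's text
--     if current_speaker and current_text: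
--         lines.append((current_speaker, ' '.join(current_text)))
--
--     return lines
-- ===== SOURCE B (Python) =====
-- def parse_podcast_script(script: str) -> list:
--     """Parse podcast script into list of (speaker, text) tuples."""
--     def header(l):
--         if l.startswith('Alex:'):
--             return ('Alex', l[5:].strip())
--         if l.startswith('Sam:'):
--             return ('Sam', l[4:].strip())
--         return None
--
--     lines = [l for l in (raw.strip() for raw in script.split('\n')) if l]
--
--     result = []
--     i = 0
--     # skip any leading continuation lines (no speaker yet)
--     while i < len(lines) and header(lines[i]) is None:
--         i += 1
--     # cut the remaining lines into blocks: a header line plus its continuations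
--     while i < len(lines):
--         spk, first = header(lines[i])
--         j = i + 1
--         while j < len(lines) and header(lines[j]) is None:
--             j += 1
--         result.append((spk, ' '.join([first] + lines[i + 1:j])))
--         i = j
--     return result
-- ===== Notes on version B (the rewrite author's own statement) =====
-- stated objective: alternative
-- what changed: Replaces A's streaming current_speaker/current_text/flush state machine with a staged block scanner: strip-and-filter the lines once, skip leading continuation lines, then repeatedly locate the next header line with a second pointer and emit each block (header plus its continuation slice) joined in one step.
import Mathlib
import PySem

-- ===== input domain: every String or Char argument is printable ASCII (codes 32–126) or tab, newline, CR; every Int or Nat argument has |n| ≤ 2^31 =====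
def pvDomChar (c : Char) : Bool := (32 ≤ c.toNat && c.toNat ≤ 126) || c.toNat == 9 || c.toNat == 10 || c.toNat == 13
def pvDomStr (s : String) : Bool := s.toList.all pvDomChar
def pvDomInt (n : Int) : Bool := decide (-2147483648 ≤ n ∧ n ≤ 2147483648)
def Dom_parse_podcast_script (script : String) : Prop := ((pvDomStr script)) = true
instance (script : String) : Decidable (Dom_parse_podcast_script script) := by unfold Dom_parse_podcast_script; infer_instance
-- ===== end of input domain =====

-- B replaces A's streaming state machine with a staged block scanner over the pre-filtered
-- line list, emitting each header-led block in one step (objective: alternative).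

-- ===== PORT A =====
-- A's loop state: (lines, current_speaker, current_text)
def pvStepA (st : List (String × String) × Option String × List String) (raw : String) :
    List (String × String) × Option String × List String :=
  let line := PySem.Str.strip raw
  if line = "" then st
  else if PySem.Str.startswith line "Alex:" then
    let lines := match st.2.1 with
      | some s => if st.2.2 ≠ [] then st.1 ++ [(s, PySem.Str.join " " st.2.2)] else st.1
      | none => st.1
    (lines, some "Alex", [PySem.Str.strip (PySem.Str.slice line (some 5) none)])
  else if PySem.Str.startswith line "Sam:" then
    let lines := match st.2.1 with
      | some s => if st.2.2 ≠ [] then st.1 ++ [(s, PySem.Str.join " " st.2.2)] else st.1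
      | none => st.1
    (lines, some "Sam", [PySem.Str.strip (PySem.Str.slice line (some 4) none)])
  else match st.2.1 with
    | some _ => (st.1, st.2.1, st.2.2 ++ [line])
    | none => st

def parse_podcast_script (script : String) : List (String × String) :=
  let st := ((PySem.Str.split? script "\n").getD []).foldl pvStepA ([], none, [])
  match st.2.1 with
  | some s => if st.2.2 ≠ [] then st.1 ++ [(s, PySem.Str.join " " st.2.2)] else st.1
  | none => st.1

-- ===== PORT B =====
def pvHeader (l : String) : Option (String × String) :=
  if PySem.Str.startswith l "Alex:" then some ("Alex", PySem.Str.strip (PySem.Str.slice l (some 5) none))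
  else if PySem.Str.startswith l "Sam:" then some ("Sam", PySem.Str.strip (PySem.Str.slice l (some 4) none))
  else none

def pvNoHeader (l : String) : Bool := (pvHeader l).isNone

-- the main while loop: the suffix from pointer i; the inner j-scan is the takeWhile/dropWhile cut
def pvBlocks : List String → List (String × String)
  | [] => []
  | l :: ls =>
    match pvHeader l with
    | some (spk, first) =>
        (spk, PySem.Str.join " " (first :: ls.takeWhile pvNoHeader)) ::
          pvBlocks (ls.dropWhile pvNoHeader)
    | none => pvBlocks ls    -- unreachable after the leading skip; mirrors advancing past the line
  termination_by ls => ls.length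
  decreasing_by
    · exact Nat.lt_succ_of_le (ls.dropWhile_sublist pvNoHeader).length_le
    · exact Nat.lt_succ_self _

def parse_podcast_script_alt (script : String) : List (String × String) :=
  let lines := (((PySem.Str.split? script "\n").getD []).map PySem.Str.strip).filter (fun l => l ≠ "")
  pvBlocks (lines.dropWhile pvNoHeader)

-- ===== PRECONDITION & SPEC =====
def Spec_parse_podcast_script (script : String) (out : List (String × String)) : Prop := out = parse_podcast_script_alt script
instance (script : String) (out : List (String × String)) : Decidable (Spec_parse_podcast_script script out) := by unfold Spec_parse_podcast_script; infer_instance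

-- ===== CLAIM (what is proved, stated in full; the proofs are below) =====
def Claim_equal_parse_podcast_script : Prop := ∀ (script : String), Dom_parse_podcast_script script → Spec_parse_podcast_script script (parse_podcast_script script)

-- ===== LEMMAS AND PROOFS =====

-- A's step on an already-stripped, nonempty line
def pvStepANE (st : List (String × String) × Option String × List String) (line : String) :
    List (String × String) × Option String × List String :=
  if PySem.Str.startswith line "Alex:" then
    let lines := match st.2.1 with
      | some s => if st.2.2 ≠ [] then st.1 ++ [(s, PySem.Str.join " " st.2.2)] else st.1
      | none => st.1
    (lines, some "Alex", [PySem.Str.strip (PySem.Str.slice line (some 5) none)])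
  else if PySem.Str.startswith line "Sam:" then
    let lines := match st.2.1 with
      | some s => if st.2.2 ≠ [] then st.1 ++ [(s, PySem.Str.join " " st.2.2)] else st.1
      | none => st.1
    (lines, some "Sam", [PySem.Str.strip (PySem.Str.slice line (some 4) none)])
  else match st.2.1 with
    | some _ => (st.1, st.2.1, st.2.2 ++ [line])
    | none => st

theorem pvStepA_eq (st : List (String × String) × Option String × List String) (raw : String) :
    pvStepA st raw =
      if PySem.Str.strip raw = "" then st else pvStepANE st (PySem.Str.strip raw) := rfl

-- A's final flush
def pvFinal (st : List (String × String) × Option String × List String) : List (String × String) :=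
  match st.2.1 with
  | some s => if st.2.2 ≠ [] then st.1 ++ [(s, PySem.Str.join " " st.2.2)] else st.1
  | none => st.1

theorem foldl_stepA_filter (raws : List String)
    (st : List (String × String) × Option String × List String) :
    raws.foldl pvStepA st =
      ((raws.map PySem.Str.strip).filter (fun l => l ≠ "")).foldl pvStepANE st := by
  induction raws generalizing st with
  | nil => rfl
  | cons r rs ih =>
    simp only [List.foldl_cons, List.map_cons, List.filter_cons, pvStepA_eq]
    by_cases h : PySem.Str.strip r = "" <;> simp [h, ih]

theorem pvBlocks_of_some (ls : List String)
    (spk first : String) (l : String) (h : pvHeader l = some (spk, first)) :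
    pvBlocks (l :: ls) =
      (spk, PySem.Str.join " " (first :: ls.takeWhile pvNoHeader)) ::
        pvBlocks (ls.dropWhile pvNoHeader) := by
  rw [pvBlocks, h]

-- with a pending speaker, A's fold finishes the current block and then agrees with pvBlocks
theorem pvFoldl_some (ls : List String) (acc : List (String × String))
    (s : String) (ps : List String) (hps : ps ≠ []) :
    pvFinal (ls.foldl pvStepANE (acc, some s, ps)) =
      acc ++ (s, PySem.Str.join " " (ps ++ ls.takeWhile pvNoHeader)) ::
        pvBlocks (ls.dropWhile pvNoHeader) := by
  induction ls generalizing acc s ps with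
  | nil => simp [pvFinal, hps, pvBlocks]
  | cons l ls ih =>
    by_cases hA : PySem.Chars.startswith l.toList ['A', 'l', 'e', 'x', ':'] = true
    · have hH : pvHeader l = some ("Alex", PySem.Str.strip (PySem.Str.slice l (some 5) none)) := by
        simp [pvHeader, hA]
      have hnh : pvNoHeader l = false := by simp [pvNoHeader, hH]
      rw [List.foldl_cons]
      show pvFinal (ls.foldl pvStepANE (pvStepANE (acc, some s, ps) l)) = _
      rw [show pvStepANE (acc, some s, ps) l =
            (acc ++ [(s, PySem.Str.join " " ps)], some "Alex",
              [PySem.Str.strip (PySem.Str.slice l (some 5) none)]) by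
            simp [pvStepANE, hA, hps]]
      rw [ih _ _ _ (by simp)]
      simp [hnh, pvBlocks_of_some _ _ _ _ hH]
    · by_cases hS : PySem.Chars.startswith l.toList ['S', 'a', 'm', ':'] = true
      · have hH : pvHeader l = some ("Sam", PySem.Str.strip (PySem.Str.slice l (some 4) none)) := by
          simp [pvHeader, hA, hS]
        have hnh : pvNoHeader l = false := by simp [pvNoHeader, hH]
        rw [List.foldl_cons]
        show pvFinal (ls.foldl pvStepANE (pvStepANE (acc, some s, ps) l)) = _
        rw [show pvStepANE (acc, some s, ps) l =
              (acc ++ [(s, PySem.Str.join " " ps)], some "Sam",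
                [PySem.Str.strip (PySem.Str.slice l (some 4) none)]) by
              simp [pvStepANE, hA, hS, hps]]
        rw [ih _ _ _ (by simp)]
        simp [hnh, pvBlocks_of_some _ _ _ _ hH]
      · have hH : pvHeader l = none := by simp [pvHeader, hA, hS]
        have hnh : pvNoHeader l = true := by simp [pvNoHeader, hH]
        rw [List.foldl_cons]
        show pvFinal (ls.foldl pvStepANE (pvStepANE (acc, some s, ps) l)) = _
        rw [show pvStepANE (acc, some s, ps) l = (acc, some s, ps ++ [l]) by
              simp [pvStepANE, hA, hS]]
        rw [ih _ _ _ (by simp)]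
        simp [hnh]

-- with no speaker yet, A's fold agrees with pvBlocks after the leading skip
theorem pvFoldl_none (ls : List String) (acc : List (String × String)) :
    pvFinal (ls.foldl pvStepANE (acc, none, [])) =
      acc ++ pvBlocks (ls.dropWhile pvNoHeader) := by
  induction ls generalizing acc with
  | nil => simp [pvFinal, pvBlocks]
  | cons l ls ih =>
    by_cases hA : PySem.Chars.startswith l.toList ['A', 'l', 'e', 'x', ':'] = true
    · have hH : pvHeader l = some ("Alex", PySem.Str.strip (PySem.Str.slice l (some 5) none)) := by
        simp [pvHeader, hA]
      have hnh : pvNoHeader l = false := by simp [pvNoHeader, hH]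
      rw [List.foldl_cons]
      show pvFinal (ls.foldl pvStepANE (pvStepANE (acc, none, []) l)) = _
      rw [show pvStepANE (acc, none, []) l =
            (acc, some "Alex", [PySem.Str.strip (PySem.Str.slice l (some 5) none)]) by
            simp [pvStepANE, hA]]
      rw [pvFoldl_some _ _ _ _ (by simp)]
      simp [hnh, pvBlocks_of_some _ _ _ _ hH]
    · by_cases hS : PySem.Chars.startswith l.toList ['S', 'a', 'm', ':'] = true
      · have hH : pvHeader l = some ("Sam", PySem.Str.strip (PySem.Str.slice l (some 4) none)) := by
          simp [pvHeader, hA, hS]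
        have hnh : pvNoHeader l = false := by simp [pvNoHeader, hH]
        rw [List.foldl_cons]
        show pvFinal (ls.foldl pvStepANE (pvStepANE (acc, none, []) l)) = _
        rw [show pvStepANE (acc, none, []) l =
              (acc, some "Sam", [PySem.Str.strip (PySem.Str.slice l (some 4) none)]) by
              simp [pvStepANE, hA, hS]]
        rw [pvFoldl_some _ _ _ _ (by simp)]
        simp [hnh, pvBlocks_of_some _ _ _ _ hH]
      · have hH : pvHeader l = none := by simp [pvHeader, hA, hS]
        have hnh : pvNoHeader l = true := by simp [pvNoHeader, hH]
        rw [List.foldl_cons]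
        show pvFinal (ls.foldl pvStepANE (pvStepANE (acc, none, []) l)) = _
        rw [show pvStepANE (acc, none, []) l = (acc, none, []) by simp [pvStepANE, hA, hS]]
        rw [ih]
        simp [hnh]

-- ===== VERDICT (by name: the statement is the Claim_ definition above) =====
theorem parse_podcast_script_spec : Claim_equal_parse_podcast_script := by
  intro script _
  unfold Spec_parse_podcast_script parse_podcast_script parse_podcast_script_alt
  rw [foldl_stepA_filter]
  exact pvFoldl_none _ []
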